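-- pv_equiv track=rewrite | github.com/Niklas-KOI/DRL22 | src/util.py | get_subdir_by_params
-- ===== SOURCE A (Python) =====
-- def get_subdir_by_params(path_params, ctr=0):
--     param_strs = []
--
--     def shorten_split_elem(elem_str, chars_to_split):
--         split_elems = elem_str.split(chars_to_split[0])
--         short_split_elem_strs = []
--         for split_elem in split_elems:
--             if len(chars_to_split) == 1:
--                 if split_elem.find("_") == -1:
--                     short_split_elem = str(split_elem)
--                 else:
--                     short_split_elem = "_".join([us_elem[:2] for us_elem in split_elem.split("_")])
--             else:
--                 short_split_elem = shorten_split_elem(split_elem, chars_to_split[1:])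
--             short_split_elem_strs.append(short_split_elem)
--         short_ret_str = chars_to_split[0].join(short_split_elem_strs)
--         return short_ret_str
--
--     for p,v in sorted(path_params.items()):
--         if str(v) == '':
--             continue
--         this_key_str = "".join([s[:3] for s in p.split("_")])
--         chars_to_split = [",", ":", "[", "]"]
--         this_v_str = shorten_split_elem(str(v), chars_to_split)
--         this_param_str = '{}:{}'.format(this_key_str, this_v_str)
--         param_strs.append(this_param_str)
--
--     subdir_str = "|".join(param_strs)
--     subdir_str += "|" + str(ctr)
--
--     # param_subdir = "_".join(
--     #     ['{}:{}'.format("".join([s[:2] for s in p.split("_")]), str(v).split(":")[-1]) for p, v in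
--     #      sorted(path_params.items()) if str(v) != '']) + "_" + str(ctr)
--     return subdir_str
-- ===== SOURCE B (Python) =====
-- # B: single flat scan over str(v) transforming delimiter-free runs in place,
-- # instead of A's 4-level recursive split/rejoin; plus a comprehension-based outer pass.
--
-- def _short_key(p):
--     return "".join(s[:3] for s in p.split("_"))
--
-- def _short_leaf(tok):
--     return "_".join(u[:2] for u in tok.split("_")) if "_" in tok else tok
--
-- def _short_value(s):
--     out = []
--     buf = []
--     for ch in s:
--         if ch in ",:[]":
--             out.append(_short_leaf("".join(buf)))
--             out.append(ch)
--             buf = []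
--         else:
--             buf.append(ch)
--     out.append(_short_leaf("".join(buf)))
--     return "".join(out)
--
-- def get_subdir_by_params(path_params, ctr=0):
--     parts = ['{}:{}'.format(_short_key(p), _short_value(str(v)))
--              for p, v in sorted(path_params.items()) if str(v) != '']
--     return "|".join(parts) + "|" + str(ctr)
-- ===== Notes on version B (the rewrite author's own statement) =====
-- stated objective: simpler
-- what changed: A's 4-level recursive split-on-delimiter/transform/rejoin of the value string is replaced by a single flat character scan that transforms each delimiter-free run in place and keeps delimiters where they are; the outer loop becomes a comprehension.
import Mathlib
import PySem

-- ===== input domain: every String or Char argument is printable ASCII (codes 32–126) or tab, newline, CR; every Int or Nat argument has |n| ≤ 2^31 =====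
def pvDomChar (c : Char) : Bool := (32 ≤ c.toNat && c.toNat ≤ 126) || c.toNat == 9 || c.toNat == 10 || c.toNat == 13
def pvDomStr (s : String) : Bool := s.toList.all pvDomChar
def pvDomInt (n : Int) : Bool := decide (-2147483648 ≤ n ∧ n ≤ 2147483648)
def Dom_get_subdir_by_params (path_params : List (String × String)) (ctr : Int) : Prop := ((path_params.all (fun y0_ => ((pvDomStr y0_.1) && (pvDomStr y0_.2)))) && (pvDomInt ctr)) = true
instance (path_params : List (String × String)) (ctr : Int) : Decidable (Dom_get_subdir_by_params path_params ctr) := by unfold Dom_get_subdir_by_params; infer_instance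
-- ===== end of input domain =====

-- B replaces A's 4-level recursive split/rejoin of the value string by a single flat scan that
-- transforms each delimiter-free run in place (objective: simpler); same return value everywhere.

-- ===== PORT A =====
-- leaf rule of shorten_split_elem (len(chars_to_split) == 1 case body)
def pvLeafA (t : List Char) : List Char :=
  if PySem.Chars.find t ['_'] == -1 then t
  else PySem.Chars.join ['_'] ((PySem.Chars.splitOn t ['_']).map (fun u => PySem.Chars.slice u none (some 2)))

-- shorten_split_elem: split on chars_to_split[0], recurse on the rest, rejoin
def pvShortenA : List Char → List Char → List Char
  | _, [] => []   -- Python would raise IndexError here; A always passes a nonempty list, so unreachable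
  | t, d :: ds =>
    PySem.Chars.join [d] ((PySem.Chars.splitOn t [d]).map (fun u =>
      if ds.isEmpty then pvLeafA u else pvShortenA u ds))

def get_subdir_by_params (path_params : List (String × String)) (ctr : Int) : String :=
  let items := PySem.List.sorted2 (PySem.Dict.ofList path_params).items Prod.fst Prod.snd
  let param_strs := items.foldl (fun (acc : List (List Char)) pv =>
    if pv.2 == "" then acc
    else acc ++ [PySem.Chars.join [] ((PySem.Chars.splitOn pv.1.toList ['_']).map (fun s => PySem.Chars.slice s none (some 3)))
                 ++ [':'] ++ pvShortenA pv.2.toList [',', ':', '[', ']']]) []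
  String.ofList (PySem.Chars.join ['|'] param_strs ++ ['|'] ++ PySem.Int.toChars ctr)

-- ===== PORT B =====
-- _short_key
def pvShortKeyB (p : String) : List Char :=
  PySem.Chars.join [] ((PySem.Chars.splitOn p.toList ['_']).map (fun s => PySem.Chars.slice s none (some 3)))

-- _short_leaf
def pvLeafB (t : List Char) : List Char :=
  if PySem.Chars.isIn ['_'] t then
    PySem.Chars.join ['_'] ((PySem.Chars.splitOn t ['_']).map (fun u => PySem.Chars.slice u none (some 2)))
  else t

-- _short_value: one pass over the characters, buffering delimiter-free runs
def pvShortValueB (s : List Char) : List Char :=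
  let st := s.foldl (fun (acc : List (List Char) × List Char) c =>
    if c ∈ [',', ':', '[', ']'] then (acc.1 ++ [pvLeafB acc.2, [c]], [])
    else (acc.1, acc.2 ++ [c])) (([], []) : List (List Char) × List Char)
  PySem.Chars.join [] (st.1 ++ [pvLeafB st.2])

def get_subdir_by_params_alt (path_params : List (String × String)) (ctr : Int) : String :=
  let parts := ((PySem.List.sorted2 (PySem.Dict.ofList path_params).items Prod.fst Prod.snd).filter
      (fun pv => pv.2 != "")).map (fun pv => pvShortKeyB pv.1 ++ [':'] ++ pvShortValueB pv.2.toList)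
  String.ofList (PySem.Chars.join ['|'] parts ++ ['|'] ++ PySem.Int.toChars ctr)

-- ===== PRECONDITION & SPEC =====
def Spec_get_subdir_by_params (path_params : List (String × String)) (ctr : Int) (out : String) : Prop := out = get_subdir_by_params_alt path_params ctr
instance (path_params : List (String × String)) (ctr : Int) (out : String) : Decidable (Spec_get_subdir_by_params path_params ctr out) := by unfold Spec_get_subdir_by_params; infer_instance

-- ===== CLAIM (what is proved, stated in full; the proofs are below) =====
def Claim_equal_get_subdir_by_params : Prop := ∀ (path_params : List (String × String)) (ctr : Int), Dom_get_subdir_by_params path_params ctr → Spec_get_subdir_by_params path_params ctr (get_subdir_by_params path_params ctr)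

-- ===== LEMMAS AND PROOFS =====

-- recursive characterization of Python's s.split(d) for a single-char d
def splitRec (d : Char) : List Char → List (List Char)
  | [] => [[]]
  | c :: r => if c = d then [] :: splitRec d r
              else (c :: (splitRec d r).headI) :: (splitRec d r).tail

def consHead (x : List Char) : List (List Char) → List (List Char)
  | [] => [x]
  | p :: ps => (x ++ p) :: ps

-- recursive characterization of B's scan: buffer buf, remaining input t
def tokF (ds : List Char) : List Char → List Char → List Char
  | buf, [] => pvLeafB buf
  | buf, c :: r => if c ∈ ds then pvLeafB buf ++ c :: tokF ds [] r else tokF ds (buf ++ [c]) r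

theorem splitRec_ne_nil (d : Char) (t : List Char) : splitRec d t ≠ [] := by
  cases t with
  | nil => simp [splitRec]
  | cons c r => simp only [splitRec]; split <;> simp

theorem go_spec (d : Char) (t : List Char) : ∀ (fuel : Nat) (cur : List Char) (acc : List (List Char)),
    t.length < fuel →
    PySem.Chars.splitOn.go [d] fuel t cur acc = acc.reverse ++ consHead cur.reverse (splitRec d t) := by
  induction t with
  | nil =>
    intro fuel cur acc h
    match fuel with
    | f + 1 => simp [PySem.Chars.splitOn.go, splitRec, consHead]
  | cons c r ih =>
    intro fuel cur acc h
    match fuel with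
    | f + 1 =>
      rw [PySem.Chars.splitOn.go]
      by_cases hc : c = d
      · subst hc
        simp only [List.isPrefixOf, beq_self_eq_true, Bool.true_and, if_true]
        simp only [List.length_cons, List.length_nil, Nat.zero_add, List.drop_succ_cons, List.drop_zero]
        rw [ih f [] (cur.reverse :: acc) (by simpa using h)]
        simp only [splitRec, consHead]
        cases hrr : splitRec c r with
        | nil => exact absurd hrr (splitRec_ne_nil c r)
        | cons p ps => simp
      · have : ([d].isPrefixOf (c :: r)) = false := by
          simp [List.isPrefixOf]; exact fun hdc => absurd hdc.symm hc
        rw [if_neg (by simp [this])]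
        rw [ih f (c :: cur) acc (by simpa using h)]
        obtain ⟨p, ps, hps⟩ : ∃ p ps, splitRec d r = p :: ps := by
          cases hrr : splitRec d r with
          | nil => exact absurd hrr (splitRec_ne_nil d r)
          | cons p ps => exact ⟨p, ps, rfl⟩
        simp [splitRec, hc, hps, consHead]

theorem splitOn_single (d : Char) (t : List Char) :
    PySem.Chars.splitOn t [d] = splitRec d t := by
  rw [PySem.Chars.splitOn, go_spec d t (t.length + 1) [] [] (by omega)]
  simp only [List.reverse_nil, List.nil_append]
  cases h : splitRec d t with
  | nil => exact absurd h (splitRec_ne_nil d t)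
  | cons p ps => simp [consHead]

theorem joinNil (xs : List (List Char)) : PySem.Chars.join [] xs = xs.flatten := by
  induction xs with
  | nil => simp [PySem.Chars.join_nil]
  | cons p ps ih =>
    cases ps with
    | nil => simp [PySem.Chars.join_singleton]
    | cons q rest => rw [PySem.Chars.join_cons_cons, ih]; simp

theorem join_head_append (sep a p : List Char) (ps : List (List Char)) :
    PySem.Chars.join sep ((a ++ p) :: ps) = a ++ PySem.Chars.join sep (p :: ps) := by
  cases ps with
  | nil => simp [PySem.Chars.join_singleton]
  | cons q rest => rw [PySem.Chars.join_cons_cons, PySem.Chars.join_cons_cons]; simp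

theorem leafAB (t : List Char) : pvLeafA t = pvLeafB t := by
  unfold pvLeafA pvLeafB
  by_cases h : PySem.Chars.find t ['_'] = -1
  · rw [if_pos (by simpa using h)]
    rw [if_neg]
    simp only [PySem.Chars.isIn, bne_iff_ne, ne_eq, h, not_true_eq_false]
    · simp
  · rw [if_neg (by simpa using h)]
    rw [if_pos]
    simp only [PySem.Chars.isIn, bne_iff_ne, ne_eq]
    exact h

theorem tokF_shift (ds x : List Char) (hx : ∀ c ∈ x, c ∉ ds) :
    ∀ (buf y : List Char), tokF ds buf (x ++ y) = tokF ds (buf ++ x) y := by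
  induction x with
  | nil => intro buf y; simp
  | cons c x' ih =>
    intro buf y
    have hc : c ∉ ds := hx c (by simp)
    have hx' : ∀ c ∈ x', c ∉ ds := fun a ha => hx a (by simp [ha])
    simp only [List.cons_append, tokF, if_neg (by simpa using hc)]
    rw [ih hx' (buf ++ [c]) y]
    simp

theorem tokF_free (ds x : List Char) (hx : ∀ c ∈ x, c ∉ ds) : tokF ds [] x = pvLeafB x := by
  have := tokF_shift ds x hx [] []
  simpa [tokF] using this

theorem foldB (t : List Char) : ∀ (out : List (List Char)) (buf : List Char),
    (t.foldl (fun (acc : List (List Char) × List Char) c =>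
        if c ∈ [',', ':', '[', ']'] then (acc.1 ++ [pvLeafB acc.2, [c]], [])
        else (acc.1, acc.2 ++ [c])) (out, buf)).1.flatten
      ++ pvLeafB (t.foldl (fun (acc : List (List Char) × List Char) c =>
        if c ∈ [',', ':', '[', ']'] then (acc.1 ++ [pvLeafB acc.2, [c]], [])
        else (acc.1, acc.2 ++ [c])) (out, buf)).2
    = out.flatten ++ tokF [',', ':', '[', ']'] buf t := by
  induction t with
  | nil => intro out buf; simp [tokF]
  | cons c r ih =>
    intro out buf
    by_cases hc : c ∈ [',', ':', '[', ']']
    · simp only [List.foldl_cons, if_pos hc]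
      rw [ih (out ++ [pvLeafB buf, [c]]) []]
      simp only [tokF]
      rw [if_pos hc]
      simp
    · simp only [List.foldl_cons, if_neg hc]
      rw [ih out (buf ++ [c])]
      simp only [tokF]
      rw [if_neg hc]

theorem tokB_eq (s : List Char) : pvShortValueB s = tokF [',', ':', '[', ']'] [] s := by
  unfold pvShortValueB
  rw [joinNil]
  simp only [List.flatten_append, List.flatten_cons, List.flatten_nil, List.append_nil]
  exact foldB s [] []

theorem tokF_split (d : Char) (ds : List Char) (hd : d ∉ ds) (t : List Char) :
    ∀ (buf : List Char), (∀ c ∈ buf, c ∉ ds ∧ c ≠ d) →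
      tokF (d :: ds) buf t
        = PySem.Chars.join [d] ((consHead buf (splitRec d t)).map (tokF ds [])) := by
  induction t with
  | nil =>
    intro buf hbuf
    simp only [splitRec, consHead, List.append_nil, List.map_cons, List.map_nil,
      PySem.Chars.join_singleton]
    rw [tokF_free ds buf (fun c hc => (hbuf c hc).1)]
    rfl
  | cons c r ih =>
    intro buf hbuf
    obtain ⟨p, ps, hps⟩ : ∃ p ps, splitRec d r = p :: ps := by
      cases hrr : splitRec d r with
      | nil => exact absurd hrr (splitRec_ne_nil d r)
      | cons p ps => exact ⟨p, ps, rfl⟩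
    have hb : ∀ a ∈ buf, a ∉ ds := fun a ha => (hbuf a ha).1
    by_cases hcd : c = d
    · subst hcd
      have h1 : tokF (c :: ds) buf (c :: r) = pvLeafB buf ++ c :: tokF (c :: ds) [] r := by
        simp [tokF]
      rw [h1, ih [] (by simp), hps]
      have hsp : splitRec c (c :: r) = [] :: p :: ps := by simp [splitRec, hps]
      rw [hsp]
      simp only [consHead, List.append_nil, List.nil_append, List.map_cons,
        PySem.Chars.join_cons_cons]
      rw [tokF_free ds buf hb]
      simp
    · by_cases hcds : c ∈ ds
      · have h1 : tokF (d :: ds) buf (c :: r) = pvLeafB buf ++ c :: tokF (d :: ds) [] r := by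
          simp [tokF, hcds]
        rw [h1, ih [] (by simp), hps]
        have hsp : splitRec d (c :: r) = (c :: p) :: ps := by simp [splitRec, hps, hcd]
        rw [hsp]
        simp only [consHead, List.nil_append, List.map_cons]
        have h3 : tokF ds [] (buf ++ c :: p) = (pvLeafB buf ++ [c]) ++ tokF ds [] p := by
          have he : buf ++ c :: p = buf ++ ([c] ++ p) := by simp
          rw [he, tokF_shift ds buf hb [] ([c] ++ p)]
          simp only [List.nil_append, List.singleton_append, tokF]
          rw [if_pos hcds]
          simp
        rw [h3, join_head_append]
        simp
      · have h1 : tokF (d :: ds) buf (c :: r) = tokF (d :: ds) (buf ++ [c]) r := by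
          simp [tokF, hcds, hcd]
        rw [h1, ih (buf ++ [c]) (by
          intro a ha
          rcases List.mem_append.mp ha with h | h
          · exact hbuf a h
          · simp at h; subst h; exact ⟨hcds, hcd⟩), hps]
        have hsp : splitRec d (c :: r) = (c :: p) :: ps := by simp [splitRec, hps, hcd]
        rw [hsp]
        simp [consHead]

theorem A_eq (ds : List Char) (hne : ds ≠ []) (hnd : ds.Nodup) (t : List Char) :
    pvShortenA t ds = tokF ds [] t := by
  induction ds generalizing t with
  | nil => exact absurd rfl hne
  | cons d ds' ih =>
    have hmap : ∀ u, (if ds'.isEmpty then pvLeafA u else pvShortenA u ds') = tokF ds' [] u := by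
      intro u
      cases hds' : ds' with
      | nil =>
        simp only [List.isEmpty_nil, if_true]
        rw [leafAB, ← tokF_free [] u (by simp)]
      | cons e es =>
        simp only [List.isEmpty_cons, Bool.false_eq_true, if_false]
        rw [← hds']
        exact ih (by simp [hds']) (List.Nodup.of_cons hnd) u
    show PySem.Chars.join [d] ((PySem.Chars.splitOn t [d]).map (fun u =>
      if ds'.isEmpty then pvLeafA u else pvShortenA u ds')) = tokF (d :: ds') [] t
    rw [splitOn_single]
    have hfun : (splitRec d t).map (fun u => if ds'.isEmpty then pvLeafA u else pvShortenA u ds')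
        = (splitRec d t).map (tokF ds' []) := List.map_congr_left (fun u _ => hmap u)
    rw [hfun, tokF_split d ds' (by simp at hnd; exact hnd.1) t [] (by simp)]
    obtain ⟨p, ps, hps⟩ : ∃ p ps, splitRec d t = p :: ps := by
      cases hrr : splitRec d t with
      | nil => exact absurd hrr (splitRec_ne_nil d t)
      | cons p ps => exact ⟨p, ps, rfl⟩
    simp [hps, consHead]

theorem core_eq (s : List Char) : pvShortenA s [',', ':', '[', ']'] = pvShortValueB s := by
  rw [tokB_eq, A_eq [',', ':', '[', ']'] (by simp) (by decide) s]

theorem outer_fold (l : List (String × String)) (f : String × String → List Char) :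
    l.foldl (fun (acc : List (List Char)) pv => if pv.2 == "" then acc else acc ++ [f pv]) []
      = (l.filter (fun pv => pv.2 != "")).map f := by
  have hcongr : l.foldl (fun (acc : List (List Char)) pv => if pv.2 == "" then acc else acc ++ [f pv]) []
      = l.foldl (fun (acc : List (List Char)) pv => if pv.2 != "" then acc ++ [f pv] else acc) [] := by
    apply PySem.List.foldl_congr_mem
    intro acc pv _
    by_cases h : pv.2 = "" <;> simp [h]
  rw [hcongr, PySem.List.foldl_append_if]
  simp

-- ===== VERDICT (by name: the statement is the Claim_ definition above) =====
theorem get_subdir_by_params_spec : Claim_equal_get_subdir_by_params := by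
  intro path_params ctr _
  unfold Spec_get_subdir_by_params get_subdir_by_params get_subdir_by_params_alt
  simp only []
  rw [outer_fold]
  have hmapeq : (fun (pv : String × String) =>
      PySem.Chars.join [] ((PySem.Chars.splitOn pv.1.toList ['_']).map (fun s => PySem.Chars.slice s none (some 3)))
        ++ [':'] ++ pvShortenA pv.2.toList [',', ':', '[', ']'])
      = fun (pv : String × String) => pvShortKeyB pv.1 ++ [':'] ++ pvShortValueB pv.2.toList := by
    funext pv
    rw [core_eq]
    rfl
  rw [hmapeq]
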